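-- pv_equiv track=rewrite | github.com/peiman/ckeletin | scripts/validate_spec.py | validate_conformance_coverage
-- ===== SOURCE A (Python) =====
-- def validate_conformance_coverage(spec_ids, conformance_ids, filename):
--     """Check that spec and conformance IDs match exactly."""
--     errors = []
--     missing_from_conformance = spec_ids - conformance_ids
--     orphaned_in_conformance = conformance_ids - spec_ids
--     for mid in sorted(missing_from_conformance):
--         errors.append(f"{filename}: spec ID '{mid}' has no conformance entry")
--     for oid in sorted(orphaned_in_conformance):
--         errors.append(f"{filename}: conformance ID '{oid}' has no matching spec requirement")
--     return errors
-- ===== SOURCE B (Python) =====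
-- def validate_conformance_coverage(spec_ids, conformance_ids, filename):
--     """Check that spec and conformance IDs match exactly."""
--     s = sorted(spec_ids)
--     c = sorted(conformance_ids)
--     missing, orphaned = [], []
--     i = j = 0
--     while i < len(s) and j < len(c):
--         if s[i] == c[j]:
--             i += 1
--             j += 1
--         elif s[i] < c[j]:
--             missing.append(f"{filename}: spec ID '{s[i]}' has no conformance entry")
--             i += 1
--         else:
--             orphaned.append(f"{filename}: conformance ID '{c[j]}' has no matching spec requirement")
--             j += 1
--     while i < len(s):
--         missing.append(f"{filename}: spec ID '{s[i]}' has no conformance entry")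
--         i += 1
--     while j < len(c):
--         orphaned.append(f"{filename}: conformance ID '{c[j]}' has no matching spec requirement")
--         j += 1
--     return missing + orphaned
-- ===== Notes on version B (the rewrite author's own statement) =====
-- stated objective: alternative
-- what changed: Replaces the two set-difference computations (hash-based membership) plus two separate sorts by sorting each side once and running a two-pointer merge of the two sorted sequences that emits a 'missing' or 'orphaned' message whenever one side's head is strictly smaller, with no membership tests at all.
import Mathlib
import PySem

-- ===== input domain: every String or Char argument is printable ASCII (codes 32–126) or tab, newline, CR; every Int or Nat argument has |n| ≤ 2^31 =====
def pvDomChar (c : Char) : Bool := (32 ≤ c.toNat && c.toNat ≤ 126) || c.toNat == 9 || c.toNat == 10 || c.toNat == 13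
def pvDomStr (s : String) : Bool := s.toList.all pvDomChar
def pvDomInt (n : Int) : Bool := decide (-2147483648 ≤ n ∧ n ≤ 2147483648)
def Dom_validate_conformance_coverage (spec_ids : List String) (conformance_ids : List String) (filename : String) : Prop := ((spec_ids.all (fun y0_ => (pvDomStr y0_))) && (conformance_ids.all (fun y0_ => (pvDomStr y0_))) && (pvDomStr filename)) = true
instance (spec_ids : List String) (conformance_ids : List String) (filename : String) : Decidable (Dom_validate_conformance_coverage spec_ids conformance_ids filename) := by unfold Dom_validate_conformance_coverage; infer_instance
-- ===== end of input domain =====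

-- B replaces A's two set differences (hash membership) each sorted separately by a
-- two-pointer merge of the two sorted id sequences (objective: alternative, same cost).

-- ===== PORT A =====
-- faithful transliteration of A: two set differences, each sorted and appended to `errors`
def validate_conformance_coverage (spec_ids : List String) (conformance_ids : List String) (filename : String) : List String :=
  let errors : List String := []
  let missing_from_conformance := PySem.Set.diff (PySem.Set.ofList spec_ids) conformance_ids
  let orphaned_in_conformance := PySem.Set.diff (PySem.Set.ofList conformance_ids) spec_ids
  let errors := (PySem.List.sorted missing_from_conformance (fun x => x) false).foldl
    (fun acc mid => acc ++ [filename ++ ": spec ID '" ++ mid ++ "' has no conformance entry"]) errors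
  let errors := (PySem.List.sorted orphaned_in_conformance (fun x => x) false).foldl
    (fun acc oid => acc ++ [filename ++ ": conformance ID '" ++ oid ++ "' has no matching spec requirement"]) errors
  errors

-- ===== PORT B =====
-- the message builders of Source B's f-strings
def pvMissMsg (filename mid : String) : String :=
  filename ++ ": spec ID '" ++ mid ++ "' has no conformance entry"
def pvOrphMsg (filename oid : String) : String :=
  filename ++ ": conformance ID '" ++ oid ++ "' has no matching spec requirement"

-- Source B's while loop over the two sorted sequences, as the obvious structural recursion
-- on the remaining suffixes (i/j are the positions already consumed)
def pvMerge (filename : String) : List String → List String → List String × List String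
  | [], cs => ([], cs.map (pvOrphMsg filename))
  | s :: ss, [] => ((s :: ss).map (pvMissMsg filename), [])
  | s :: ss, c :: cs =>
    if s = c then pvMerge filename ss cs
    else if s < c then
      (pvMissMsg filename s :: (pvMerge filename ss (c :: cs)).1,
       (pvMerge filename ss (c :: cs)).2)
    else
      ((pvMerge filename (s :: ss) cs).1,
       pvOrphMsg filename c :: (pvMerge filename (s :: ss) cs).2)
  termination_by ss cs => ss.length + cs.length

-- port of Source B: sort each side (the Python arguments are sets = distinct lists), merge, concatenate
def validate_conformance_coverage_alt (spec_ids : List String) (conformance_ids : List String) (filename : String) : List String :=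
  let s := PySem.List.sorted (PySem.Set.ofList spec_ids) (fun x => x) false
  let c := PySem.List.sorted (PySem.Set.ofList conformance_ids) (fun x => x) false
  let p := pvMerge filename s c
  p.1 ++ p.2

-- ===== PRECONDITION & SPEC =====
def Spec_validate_conformance_coverage (spec_ids : List String) (conformance_ids : List String) (filename : String) (out : List String) : Prop := out = validate_conformance_coverage_alt spec_ids conformance_ids filename
instance (spec_ids : List String) (conformance_ids : List String) (filename : String) (out : List String) : Decidable (Spec_validate_conformance_coverage spec_ids conformance_ids filename out) := by unfold Spec_validate_conformance_coverage; infer_instance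

-- ===== CLAIM (what is proved, stated in full; the proofs are below) =====
def Claim_equal_validate_conformance_coverage : Prop := ∀ (spec_ids : List String) (conformance_ids : List String) (filename : String), Dom_validate_conformance_coverage spec_ids conformance_ids filename → Spec_validate_conformance_coverage spec_ids conformance_ids filename (validate_conformance_coverage spec_ids conformance_ids filename)

-- ===== LEMMAS AND PROOFS =====

-- an element strictly below the head of a strictly increasing list is not in the list
theorem not_mem_of_lt_head (x c : String) (cs : List String)
    (hC : (c :: cs).Pairwise (· < ·)) (hx : x < c) : x ∉ c :: cs := by
  intro hmem
  rcases List.mem_cons.mp hmem with h | h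
  · exact absurd hx (by simp [h])
  · exact absurd (lt_trans hx ((List.pairwise_cons.mp hC).1 x h)) (lt_irrefl x)

-- dropping a non-matching head from the avoid-list of a non-membership filter
theorem filter_not_contains_cons (a : String) (l rem : List String)
    (h : ∀ x ∈ l, x ≠ a) :
    l.filter (fun x => !(a :: rem).contains x) = l.filter (fun x => !rem.contains x) := by
  apply List.filter_congr
  intro x hx
  have hne := h x hx
  simp [hne]

-- characterisation of the merge: it computes the two filtered difference lists
theorem pvMerge_eq_filter (filename : String) (S C : List String) :
    S.Pairwise (· < ·) → C.Pairwise (· < ·) →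
    pvMerge filename S C
      = ((S.filter (fun x => !C.contains x)).map (pvMissMsg filename),
         (C.filter (fun x => !S.contains x)).map (pvOrphMsg filename)) := by
  fun_induction pvMerge filename S C
  case case1 =>
    rename_i cs
    intro _ _; simp
  case case2 =>
    rename_i s ss
    intro _ _; simp
  case case3 =>
    rename_i ss c cs ih
    intro hS hC
    rw [ih (List.pairwise_cons.mp hS).2 (List.pairwise_cons.mp hC).2]
    have hss : ∀ x ∈ ss, c < x := (List.pairwise_cons.mp hS).1
    have hcs : ∀ x ∈ cs, c < x := (List.pairwise_cons.mp hC).1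
    have e1 : List.filter (fun x => !(c :: cs).contains x) (c :: ss)
        = List.filter (fun x => !cs.contains x) ss := by
      rw [List.filter_cons,
          filter_not_contains_cons c ss cs (fun x hx => ne_of_gt (hss x hx))]
      simp
    have e2 : List.filter (fun x => !(c :: ss).contains x) (c :: cs)
        = List.filter (fun x => !ss.contains x) cs := by
      rw [List.filter_cons,
          filter_not_contains_cons c cs ss (fun x hx => ne_of_gt (hcs x hx))]
      simp
    rw [e1, e2]
  case case4 =>
    rename_i s ss c cs hne hlt ih
    intro hS hC
    rw [ih (List.pairwise_cons.mp hS).2 hC]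
    have hnm : s ∉ c :: cs := not_mem_of_lt_head s c cs hC hlt
    have hcs : ∀ x ∈ c :: cs, s < x := by
      intro x hx
      rcases List.mem_cons.mp hx with h | h
      · simpa [h] using hlt
      · exact lt_trans hlt ((List.pairwise_cons.mp hC).1 x h)
    have e1 : List.filter (fun x => !(c :: cs).contains x) (s :: ss)
        = s :: List.filter (fun x => !(c :: cs).contains x) ss := by
      rw [List.filter_cons]
      simp [hnm]
    have e2 : List.filter (fun x => !(s :: ss).contains x) (c :: cs)
        = List.filter (fun x => !ss.contains x) (c :: cs) :=
      filter_not_contains_cons s (c :: cs) ss (fun x hx => ne_of_gt (hcs x hx))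
    rw [e1, e2]
    simp
  case case5 =>
    rename_i s ss c cs hne hnlt ih
    intro hS hC
    have hlt : c < s := by
      rcases lt_trichotomy s c with h | h | h
      · exact absurd h hnlt
      · exact absurd h hne
      · exact h
    rw [ih hS (List.pairwise_cons.mp hC).2]
    have hnm : c ∉ s :: ss := not_mem_of_lt_head c s ss hS hlt
    have hss : ∀ x ∈ s :: ss, c < x := by
      intro x hx
      rcases List.mem_cons.mp hx with h | h
      · simpa [h] using hlt
      · exact lt_trans hlt ((List.pairwise_cons.mp hS).1 x h)
    have e1 : List.filter (fun x => !(c :: cs).contains x) (s :: ss)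
        = List.filter (fun x => !cs.contains x) (s :: ss) :=
      filter_not_contains_cons c (s :: ss) cs (fun x hx => ne_of_gt (hss x hx))
    have e2 : List.filter (fun x => !(s :: ss).contains x) (c :: cs)
        = c :: List.filter (fun x => !(s :: ss).contains x) cs := by
      rw [List.filter_cons]
      simp [hnm]
    rw [e1, e2]
    simp
-- the sorted difference list is the sorted base list filtered by non-membership
theorem sorted_diff_eq_filter (xs ys : List String) :
    PySem.List.sorted (PySem.Set.diff (PySem.Set.ofList xs) ys) (fun x => x) false
      = (PySem.List.sorted (PySem.Set.ofList xs) (fun x => x) false).filter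
          (fun i => !(PySem.List.sorted (PySem.Set.ofList ys) (fun x => x) false).contains i) := by
  apply PySem.List.sorted_eq_of_perm_of_pairwise_lt
  · have hperm : (PySem.List.sorted (PySem.Set.ofList xs) (fun x => x) false).Perm
        (PySem.Set.ofList xs) := PySem.List.sorted_perm _ _ _
    refine (hperm.filter _).trans ?_
    rw [List.perm_ext_iff_of_nodup
      ((PySem.Set.nodup_ofList xs).filter _)
      (PySem.Set.nodup_diff _ ys (PySem.Set.nodup_ofList xs))]
    intro x
    simp [List.mem_filter, PySem.Set.mem_diff, PySem.List.mem_sorted, PySem.Set.mem_ofList]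
  · exact (PySem.List.sorted_ofList_pairwise_lt (xs := xs)).filter _
theorem ports_agree (spec_ids conformance_ids : List String) (filename : String) :
    validate_conformance_coverage spec_ids conformance_ids filename
      = validate_conformance_coverage_alt spec_ids conformance_ids filename := by
  unfold validate_conformance_coverage validate_conformance_coverage_alt
  dsimp only
  rw [pvMerge_eq_filter filename _ _
        (PySem.List.sorted_ofList_pairwise_lt (xs := spec_ids))
        (PySem.List.sorted_ofList_pairwise_lt (xs := conformance_ids))]
  dsimp only
  rw [← sorted_diff_eq_filter spec_ids conformance_ids,
      ← sorted_diff_eq_filter conformance_ids spec_ids,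
      PySem.List.foldl_append_singleton_eq_map
        (f := fun mid => filename ++ ": spec ID '" ++ mid ++ "' has no conformance entry"),
      PySem.List.foldl_append_singleton_eq_map
        (f := fun oid => filename ++ ": conformance ID '" ++ oid ++ "' has no matching spec requirement")]
  rfl

-- ===== VERDICT (by name: the statement is the Claim_ definition above) =====
theorem validate_conformance_coverage_spec : Claim_equal_validate_conformance_coverage := by
  intro spec_ids conformance_ids filename _
  exact ports_agree spec_ids conformance_ids filename
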